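-- pv_equiv track=rewrite | github.com/stevejtrettel/lifting-modp | py/numbertheory-old.py | rat_eval_mod
-- ===== SOURCE A (Python) =====
-- def poly_eval_mod(coefs_lc_to_const:list[int],x:int,p:int,rev = False):
--     if rev == True:
--         coefs_lc_to_const = coefs_lc_to_const[::-1]
--     evx = coefs_lc_to_const[0]%p
--     for c in coefs_lc_to_const[1:]:
--         evx = (evx*x+c)%p
--     return evx
--
-- def rat_eval_mod(coefdic_lc_to_const:dict,x:int,p:int,rev = False):
--     ev = 1
--     for e in coefdic_lc_to_const:
--         fac_coefs = coefdic_lc_to_const[e]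
--         fac_ev = poly_eval_mod(coefs_lc_to_const=fac_coefs,x=x,p=p,rev=rev)
--         if e>= 0 or fac_ev %p != 0:
--             ev = (ev*pow(fac_ev,e,p)) %p
--         else:
--             return 'Infinity'
--     return ev
-- ===== SOURCE B (Python) =====
-- def rat_eval_mod(coefdic_lc_to_const: dict, x: int, p: int, rev=False):
--     def fac(coefs):
--         cs = coefs if rev else coefs[::-1]
--         return sum(c * pow(x, i, p) for i, c in enumerate(cs)) % p
--     vals = [(e, fac(coefs)) for e, coefs in coefdic_lc_to_const.items()]
--     if any(e < 0 and v % p == 0 for e, v in vals):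
--         return 'Infinity'
--     ev = 1
--     for e, v in vals:
--         ev = ev * pow(v, e, p) % p
--     return ev
-- ===== Notes on version B (the rewrite author's own statement) =====
-- stated objective: alternative
-- what changed: B works in staged passes instead of A's single fused loop: it first maps every factor to its value as an explicit sum of monomials c_i*pow(x,i,p) (degree tracked by enumerate, instead of A's Horner fold), then checks the whole list for a pole with any(), and only then multiplies the precomputed factor values together.
-- outside the precondition, e.g. on rat_eval_mod({-1: [7]}, 0, 7, False): A returns 'Infinity', B returns 'Infinity'
import Mathlib
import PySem

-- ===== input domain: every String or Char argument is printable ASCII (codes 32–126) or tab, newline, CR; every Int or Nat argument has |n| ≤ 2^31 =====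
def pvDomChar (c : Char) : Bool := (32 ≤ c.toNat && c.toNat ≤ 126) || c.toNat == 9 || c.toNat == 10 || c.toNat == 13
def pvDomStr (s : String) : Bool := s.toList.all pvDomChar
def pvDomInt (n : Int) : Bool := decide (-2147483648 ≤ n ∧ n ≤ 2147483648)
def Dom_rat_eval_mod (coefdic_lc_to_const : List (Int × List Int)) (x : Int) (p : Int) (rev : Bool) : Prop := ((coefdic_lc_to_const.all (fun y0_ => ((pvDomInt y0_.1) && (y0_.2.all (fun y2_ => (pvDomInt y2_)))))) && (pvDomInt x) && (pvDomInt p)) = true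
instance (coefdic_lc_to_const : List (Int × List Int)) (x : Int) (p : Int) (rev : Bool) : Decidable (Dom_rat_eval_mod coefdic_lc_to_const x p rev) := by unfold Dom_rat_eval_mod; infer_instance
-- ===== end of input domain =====

-- B is a staged re-implementation: it maps every factor to its value as a sum of
-- monomials, checks the whole list for a pole with any(), then multiplies; A fuses
-- everything into one Horner loop with an early return. Equivalence is proved on Pre_
-- (outside it A raises or returns the string 'Infinity').

-- pow(b, e, m) for an Int exponent, used by BOTH ports exactly as Python's pow:
-- hand port (PySem.Int.powMod has a Nat exponent); for e < 0 Python computes the modular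
-- inverse of b, which is the Bézout coefficient reduced mod m — exact when m ≠ 0 and
-- (0 ≤ e or gcd b m = 1); Pre_ admits only such calls.
def pyPowMod (b : Int) (e : Int) (m : Int) : Int :=
  if 0 ≤ e then PySem.Int.powMod b e.toNat m
  else PySem.Int.powMod (PySem.Int.mod (Int.gcdA b m) m) (-e).toNat m

-- ===== PORT A =====
def poly_eval_mod (coefs_lc_to_const : List Int) (x : Int) (p : Int) (rev : Bool) : Int :=
  -- coefs[::-1] is List.reverse
  let cs := if rev then coefs_lc_to_const.reverse else coefs_lc_to_const
  -- coefs[0] raises IndexError on []: excluded by Pre_, default irrelevant there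
  let evx := PySem.Int.mod (PySem.List.pyGetD cs 0 0) p
  (PySem.List.slice cs (some 1) none).foldl (fun e c => PySem.Int.mod (e * x + c) p) evx

def ratLoopA : List (Int × List Int) → Int → Int → Bool → Int → Int
  | [], _, _, _, ev => ev
  | (e, fac_coefs) :: rest, x, p, rev, ev =>
    let fac_ev := poly_eval_mod fac_coefs x p rev
    if 0 ≤ e ∨ PySem.Int.mod fac_ev p ≠ 0 then
      ratLoopA rest x p rev (PySem.Int.mod (ev * pyPowMod fac_ev e p) p)
    else 0  -- Python returns the string 'Infinity' here: excluded by Pre_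

def rat_eval_mod (coefdic_lc_to_const : List (Int × List Int)) (x : Int) (p : Int) (rev : Bool) : Int :=
  ratLoopA (PySem.Dict.ofList coefdic_lc_to_const).items x p rev 1

-- ===== PORT B =====
def fac_eval_alt (coefs : List Int) (x : Int) (p : Int) (rev : Bool) : Int :=
  let cs := if rev then coefs else coefs.reverse
  PySem.Int.mod (((PySem.List.enumerate cs 0).map (fun ic => ic.2 * pyPowMod x ic.1 p)).sum) p

def rat_eval_mod_alt (coefdic_lc_to_const : List (Int × List Int)) (x : Int) (p : Int) (rev : Bool) : Int :=
  let vals := (PySem.Dict.ofList coefdic_lc_to_const).items.map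
    (fun pr => (pr.1, fac_eval_alt pr.2 x p rev))
  if vals.any (fun pr => pr.1 < 0 && PySem.Int.mod pr.2 p == 0) then
    0  -- Python returns the string 'Infinity' here: excluded by Pre_
  else
    vals.foldl (fun ev pr => PySem.Int.mod (ev * pyPowMod pr.2 pr.1 p) p) 1

-- ===== PRECONDITION & SPEC =====
-- spec-level value of a factor polynomial (plain Horner, no reduction)
def pvPolyVal (coefs : List Int) (x : Int) (rev : Bool) : Int :=
  (if rev then coefs.reverse else coefs).foldl (fun v c => v * x + c) 0

-- Pre_ excludes exactly the inputs on which A does not return an int: p = 0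
-- (ZeroDivisionError), an empty coefficient list reached (IndexError), a negative
-- exponent whose factor value is not invertible mod p (pow raises ValueError), and a
-- negative exponent whose factor value is ≡ 0 mod p, where A returns the STRING
-- 'Infinity' (not an int; B returns the same string there).
def Pre_rat_eval_mod (coefdic_lc_to_const : List (Int × List Int)) (x : Int) (p : Int) (rev : Bool) : Prop :=
  p ≠ 0 ∧ ∀ pr ∈ (PySem.Dict.ofList coefdic_lc_to_const).items,
    pr.2 ≠ [] ∧ (0 ≤ pr.1 ∨
      (PySem.Int.mod (pvPolyVal pr.2 x rev) p ≠ 0 ∧ Int.gcd (pvPolyVal pr.2 x rev) p = 1))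
instance (coefdic_lc_to_const : List (Int × List Int)) (x : Int) (p : Int) (rev : Bool) : Decidable (Pre_rat_eval_mod coefdic_lc_to_const x p rev) := by unfold Pre_rat_eval_mod; infer_instance

def pvWitness_rat_eval_mod : (List (Int × List Int)) × Int × Int × Bool := ([(2, [1, 2]), (-1, [1, 1])], 2, 7, false)

def Spec_rat_eval_mod (coefdic_lc_to_const : List (Int × List Int)) (x : Int) (p : Int) (rev : Bool) (out : Int) : Prop := out = rat_eval_mod_alt coefdic_lc_to_const x p rev
instance (coefdic_lc_to_const : List (Int × List Int)) (x : Int) (p : Int) (rev : Bool) (out : Int) : Decidable (Spec_rat_eval_mod coefdic_lc_to_const x p rev out) := by unfold Spec_rat_eval_mod; infer_instance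

-- ===== CLAIM (what is proved, stated in full; the proofs are below) =====
def Claim_equal_rat_eval_mod : Prop := ∀ (coefdic_lc_to_const : List (Int × List Int)) (x : Int) (p : Int) (rev : Bool), Dom_rat_eval_mod coefdic_lc_to_const x p rev → Pre_rat_eval_mod coefdic_lc_to_const x p rev → Spec_rat_eval_mod coefdic_lc_to_const x p rev (rat_eval_mod coefdic_lc_to_const x p rev)

-- ===== LEMMAS AND PROOFS =====

theorem pymod_sub_dvd (a p : Int) : p ∣ a - PySem.Int.mod a p := by
  refine ⟨PySem.Int.floordiv a p, ?_⟩
  have h := PySem.Int.floordiv_mul_add_mod a p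
  linarith

theorem pymod_eq_pymod {a b p : Int} (hp : p ≠ 0) (h : p ∣ a - b) :
    PySem.Int.mod a p = PySem.Int.mod b p := by
  have ha := pymod_sub_dvd a p
  have hb := pymod_sub_dvd b p
  have hd : p ∣ PySem.Int.mod a p - PySem.Int.mod b p := by
    have he : PySem.Int.mod a p - PySem.Int.mod b p
        = (b - PySem.Int.mod b p) - (a - PySem.Int.mod a p) + (a - b) := by ring
    rw [he]; exact dvd_add (dvd_sub hb ha) h
  have hz : PySem.Int.mod a p - PySem.Int.mod b p = 0 := by
    rcases lt_or_gt_of_ne hp with hneg | hpos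
    · have b1 := PySem.Int.mod_neg_bounds a hneg
      have b2 := PySem.Int.mod_neg_bounds b hneg
      exact Int.eq_zero_of_abs_lt_dvd (Int.neg_dvd.mpr hd) (by rw [abs_lt]; omega)
    · have b1a := PySem.Int.mod_nonneg a hpos
      have b1b := PySem.Int.mod_lt a hpos
      have b2a := PySem.Int.mod_nonneg b hpos
      have b2b := PySem.Int.mod_lt b hpos
      exact Int.eq_zero_of_abs_lt_dvd hd (by rw [abs_lt]; omega)
  linarith

theorem pymod_idem {a p : Int} (hp : p ≠ 0) :
    PySem.Int.mod (PySem.Int.mod a p) p = PySem.Int.mod a p :=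
  pymod_eq_pymod hp (by simpa using (pymod_sub_dvd a p).neg_right)

-- value of a polynomial given const-to-lc coefficients
def polyV (x : Int) : List Int → Int
  | [] => 0
  | c :: t => c + x * polyV x t

theorem polyV_append (x : Int) (r : List Int) (c : Int) :
    polyV x (r ++ [c]) = polyV x r + c * x ^ r.length := by
  induction r with
  | nil => simp [polyV]
  | cons d t ih => simp [polyV, ih]; ring

theorem horner_eq_polyV (l : List Int) (x : Int) : ∀ v : Int,
    l.foldl (fun e c => e * x + c) v = v * x ^ l.length + polyV x l.reverse := by
  induction l with
  | nil => intro v; simp [polyV]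
  | cons c t ih =>
    intro v
    simp only [List.foldl_cons, List.reverse_cons, List.length_cons]
    rw [ih (v * x + c), polyV_append]
    simp [List.length_reverse]; ring

theorem foldlA_eq (rest : List Int) (x p : Int) (hp : p ≠ 0) : ∀ v : Int,
    rest.foldl (fun e c => PySem.Int.mod (e * x + c) p) (PySem.Int.mod v p)
      = PySem.Int.mod (rest.foldl (fun e c => e * x + c) v) p := by
  induction rest with
  | nil => intro v; rfl
  | cons c t ih =>
    intro v
    simp only [List.foldl_cons]
    have hc : PySem.Int.mod (PySem.Int.mod v p * x + c) p = PySem.Int.mod (v * x + c) p := by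
      apply pymod_eq_pymod hp
      have he : (PySem.Int.mod v p * x + c) - (v * x + c) = -((v - PySem.Int.mod v p) * x) := by
        ring
      rw [he]
      exact ((pymod_sub_dvd v p).mul_right x).neg_right
    rw [hc, ih (v * x + c)]

theorem pyPowMod_natCast (b : Int) (n : Nat) (m : Int) :
    pyPowMod b (n : Int) m = PySem.Int.mod (b ^ n) m := by
  simp [pyPowMod, PySem.Int.powMod]

theorem sumB_dvd (x p : Int) (ds : List Int) : ∀ n : Nat,
    p ∣ ((PySem.List.enumerate ds (n : Int)).map (fun ic => ic.2 * pyPowMod x ic.1 p)).sum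
        - x ^ n * polyV x ds := by
  induction ds with
  | nil => intro n; simp [PySem.List.enumerate_nil, polyV]
  | cons c t ih =>
    intro n
    rw [PySem.List.enumerate_cons]
    have hcast : (n : Int) + 1 = ((n + 1 : Nat) : Int) := by push_cast; ring
    rw [hcast]
    simp only [List.map_cons, List.sum_cons, polyV, pyPowMod_natCast]
    obtain ⟨k1, h1⟩ := pymod_sub_dvd (x ^ n) p
    obtain ⟨k2, h2⟩ := ih (n + 1)
    refine ⟨-c * k1 + k2, ?_⟩
    have hpow : x ^ (n + 1) = x ^ n * x := by ring
    rw [hpow] at h2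
    linear_combination (-c) * h1 + h2

theorem fac_eq_pre (cs : List Int) (x p : Int) (rev : Bool) (hp : p ≠ 0) (hcs : cs ≠ []) :
    poly_eval_mod cs x p rev = PySem.Int.mod (pvPolyVal cs x rev) p := by
  have hl : (if rev then cs.reverse else cs) ≠ [] := by
    cases rev <;> simp [hcs]
  obtain ⟨c0, rest, hlr⟩ := List.exists_cons_of_ne_nil hl
  unfold poly_eval_mod pvPolyVal
  rw [hlr]
  simp only [PySem.List.slice_from_one, PySem.List.pyGetD_zero_cons, List.tail_cons,
    List.foldl_cons]
  rw [foldlA_eq rest x p hp c0]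
  norm_num

theorem fac_eq (cs : List Int) (x p : Int) (rev : Bool) (hp : p ≠ 0) (hcs : cs ≠ []) :
    poly_eval_mod cs x p rev = fac_eval_alt cs x p rev := by
  have hl : (if rev then cs.reverse else cs) ≠ [] := by
    cases rev <;> simp [hcs]
  obtain ⟨c0, rest, hlr⟩ := List.exists_cons_of_ne_nil hl
  have hcs' : (if rev then cs else cs.reverse) = (if rev then cs.reverse else cs).reverse := by
    cases rev <;> simp
  unfold poly_eval_mod fac_eval_alt
  rw [hlr] at hcs' ⊢
  rw [hcs']
  simp only [PySem.List.slice_from_one, PySem.List.pyGetD_zero_cons, List.tail_cons]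
  rw [foldlA_eq rest x p hp c0, horner_eq_polyV rest x c0]
  apply pymod_eq_pymod hp
  simp only [List.reverse_cons]
  have h0 := sumB_dvd x p (rest.reverse ++ [c0]) 0
  simp only [Nat.cast_zero, pow_zero, one_mul] at h0
  rw [polyV_append] at h0
  simp only [List.length_reverse] at h0
  obtain ⟨k, hk⟩ := h0
  exact ⟨-k, by linarith⟩

-- the per-item hypothesis Pre_ gives on the dict's items
def pvGood (x p : Int) (rev : Bool) (pr : Int × List Int) : Prop :=
  pr.2 ≠ [] ∧ (0 ≤ pr.1 ∨
    (PySem.Int.mod (pvPolyVal pr.2 x rev) p ≠ 0 ∧ Int.gcd (pvPolyVal pr.2 x rev) p = 1))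

theorem any_false (x p : Int) (rev : Bool) (hp : p ≠ 0) (items : List (Int × List Int))
    (h : ∀ pr ∈ items, pvGood x p rev pr) :
    (items.map (fun pr => (pr.1, fac_eval_alt pr.2 x p rev))).any
      (fun pr => pr.1 < 0 && PySem.Int.mod pr.2 p == 0) = false := by
  rw [List.any_eq_false]
  intro q hq
  obtain ⟨pr, hpr, hq'⟩ := List.mem_map.mp hq
  obtain ⟨hne, hc⟩ := h pr hpr
  subst hq'
  have hmod : PySem.Int.mod (fac_eval_alt pr.2 x p rev) p
      = PySem.Int.mod (pvPolyVal pr.2 x rev) p := by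
    rw [← fac_eq pr.2 x p rev hp hne, fac_eq_pre pr.2 x p rev hp hne]
    exact pymod_idem hp
  simp only [Bool.and_eq_true, decide_eq_true_eq, beq_iff_eq, not_and, hmod]
  intro hlt
  rcases hc with he | ⟨hne0, _⟩
  · omega
  · exact hne0

theorem loop_eq_fold (x p : Int) (rev : Bool) (hp : p ≠ 0) :
    ∀ (items : List (Int × List Int)), (∀ pr ∈ items, pvGood x p rev pr) →
    ∀ ev : Int, ratLoopA items x p rev ev
      = (items.map (fun pr => (pr.1, fac_eval_alt pr.2 x p rev))).foldl
          (fun ev pr => PySem.Int.mod (ev * pyPowMod pr.2 pr.1 p) p) ev := by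
  intro items
  induction items with
  | nil => intro _ ev; rfl
  | cons pr rest ih =>
    intro h ev
    obtain ⟨e, cs⟩ := pr
    have hc := h (e, cs) List.mem_cons_self
    have hA : 0 ≤ e ∨ PySem.Int.mod (poly_eval_mod cs x p rev) p ≠ 0 := by
      rcases hc.2 with he | ⟨hne, _⟩
      · exact Or.inl he
      · refine Or.inr ?_
        rw [fac_eq_pre cs x p rev hp hc.1, pymod_idem hp]
        exact hne
    simp only [ratLoopA, List.map_cons, List.foldl_cons]
    rw [if_pos hA, fac_eq cs x p rev hp hc.1]
    exact ih (fun q hq => h q (List.mem_cons_of_mem _ hq)) _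

-- ===== VERDICT (by name: the statement is the Claim_ definition above) =====
theorem rat_eval_mod_spec : Claim_equal_rat_eval_mod := by
  intro l x p rev _hdom hpre
  unfold Spec_rat_eval_mod rat_eval_mod rat_eval_mod_alt
  simp only [any_false x p rev hpre.1 _ hpre.2, Bool.false_eq_true, if_false]
  exact loop_eq_fold x p rev hpre.1 _ hpre.2 1
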